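-- pv_equiv track=rewrite | github.com/reggosaurus-reg/AoC19 | day16.py | fftA
-- ===== SOURCE A (Python) =====
-- def fftA(signal):
--     new_signal = []
--     for i in range(len(signal)):
--         # Construct pattern for this position (not with skipped first)
--         repeat = i + 1
--         plus_index = i
--         minus_index = i + 2 * repeat
--         cycle_interval = 4 * repeat
--
--         # Skip zeros, add 1 positions and subtract -1 positions
--         summ = 0
--         pos = i
--         while pos < len(signal):
--             if pos == plus_index:
--                 summ += sum(signal[plus_index:plus_index + repeat])
--                 pos = minus_index
--                 plus_index += cycle_interval
--             elif pos == minus_index: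
--                 summ -= sum(signal[minus_index:minus_index + repeat])
--                 pos = plus_index
--                 minus_index += cycle_interval
--
--         # Keep only 1 digit
--         new_signal.append(abs(summ) % 10)
--
--     return new_signal
-- ===== SOURCE B (Python) =====
-- def fftA(sig):
--     n = len(sig)
--     prefix = [0]
--     running = 0
--     for v in sig:
--         running += v
--         prefix.append(running)
--     out = []
--     for i in range(n):
--         rep = i + 1
--         s = 0
--         start = i
--         sign = 1
--         while start < n:
--             s += sign * (prefix[min(start + rep, n)] - prefix[start])
--             sign = -sign
--             start += 2 * rep
--         out.append(abs(s) % 10)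
--     return out
-- ===== Notes on version B (the rewrite author's own statement) =====
-- stated objective: faster
-- what changed: B precomputes a prefix-sum array once so each +/- block of the FFT pattern becomes one O(1) range difference, replacing A's per-block slice-and-sum scans.
import Mathlib
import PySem

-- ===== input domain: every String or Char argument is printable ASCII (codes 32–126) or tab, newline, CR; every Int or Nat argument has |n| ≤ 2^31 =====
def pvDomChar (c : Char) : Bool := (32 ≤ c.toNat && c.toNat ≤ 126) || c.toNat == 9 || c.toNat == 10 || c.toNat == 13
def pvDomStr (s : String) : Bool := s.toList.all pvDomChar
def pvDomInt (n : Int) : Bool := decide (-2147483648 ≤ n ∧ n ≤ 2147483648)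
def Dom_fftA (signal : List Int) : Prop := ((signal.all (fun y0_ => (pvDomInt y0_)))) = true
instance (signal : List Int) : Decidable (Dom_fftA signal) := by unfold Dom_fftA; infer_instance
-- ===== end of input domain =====

-- B replaces A's per-block slice sums by one prefix-sum array and O(1) range differences (objective: faster, measured).

-- ===== PORT A =====
-- while loop of A; the fuel argument only makes the recursion structural (signal.length + 1 always
-- suffices: pos strictly grows by 2*rep each iteration); the final 'else summ' inner branch is
-- unreachable from fftA's call (pos always equals plus or minus there; Python would loop forever).
def fftA_loop (signal : List Int) (rep cycle : Int) : Nat → Int → Int → Int → Int → Int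
  | 0, summ, _, _, _ => summ
  | fuel+1, summ, pos, plus, minus =>
    if pos < (signal.length : Int) then
      if pos = plus then
        fftA_loop signal rep cycle fuel
          (summ + (PySem.List.slice signal (some plus) (some (plus + rep))).sum)
          minus (plus + cycle) minus
      else if pos = minus then
        fftA_loop signal rep cycle fuel
          (summ - (PySem.List.slice signal (some minus) (some (minus + rep))).sum)
          plus plus (minus + cycle)
      else summ
    else summ

def fftA (signal : List Int) : List Int :=
  (PySem.List.pyRange 0 (signal.length : Int)).foldl (fun new_signal i =>
    let rep := i + 1
    let summ := fftA_loop signal rep (4 * rep) (signal.length + 1) 0 i i (i + 2 * rep)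
    new_signal ++ [PySem.Int.mod |summ| 10]) []

-- ===== PORT B =====
-- prefix-sum list [0, a0, a0+a1, ...] built by B's first loop
def fftB_prefix (signal : List Int) : List Int :=
  (signal.foldl (fun (acc : List Int × Int) v => (acc.1 ++ [acc.2 + v], acc.2 + v)) ([0], 0)).1

-- B's inner while loop; fuel as for fftA_loop; pyGetD's default 0 is never used at the indices
-- B reaches (0 ≤ start < n and min (start+rep) n are in range of the length-(n+1) prefix list).
def fftB_loop (P : List Int) (n rep : Int) : Nat → Int → Int → Int → Int
  | 0, s, _, _ => s
  | fuel+1, s, start, sign =>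
    if start < n then
      fftB_loop P n rep fuel
        (s + sign * (PySem.List.pyGetD P (min (start + rep) n) 0 - PySem.List.pyGetD P start 0))
        (start + 2 * rep) (-sign)
    else s

def fftA_alt (signal : List Int) : List Int :=
  let n : Int := signal.length
  let P := fftB_prefix signal
  (PySem.List.pyRange 0 n).foldl (fun out i =>
    out ++ [PySem.Int.mod |fftB_loop P n (i + 1) (signal.length + 1) 0 i 1| 10]) []

-- ===== PRECONDITION & SPEC =====
def Spec_fftA (signal : List Int) (out : List Int) : Prop := out = fftA_alt signal
instance (signal : List Int) (out : List Int) : Decidable (Spec_fftA signal out) := by unfold Spec_fftA; infer_instance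

-- ===== CLAIM (what is proved, stated in full; the proofs are below) =====
def Claim_equal_fftA : Prop := ∀ (signal : List Int), Dom_fftA signal → Spec_fftA signal (fftA signal)

-- ===== LEMMAS AND PROOFS =====

lemma fftB_prefix_fold (signal : List Int) : ∀ (acc : List Int) (r : Int),
    signal.foldl (fun (a : List Int × Int) v => (a.1 ++ [a.2 + v], a.2 + v)) (acc, r)
      = (acc ++ (List.range signal.length).map (fun k => r + (signal.take (k+1)).sum),
         r + signal.sum) := by
  induction signal with
  | nil => simp
  | cons v xs ih =>
      intro acc r
      simp only [List.foldl_cons, ih, List.length_cons, List.range_succ_eq_map,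
        List.map_cons, List.map_map]
      rw [Prod.mk.injEq]
      refine ⟨?_, by simp [List.sum_cons]; ring⟩
      rw [List.append_assoc]
      congr 1
      simp only [List.take_succ_cons, List.take_zero, List.sum_cons, List.sum_nil, add_zero,
        List.singleton_append]
      congr 1
      apply List.map_congr_left
      intro k _
      simp only [Function.comp_apply, Nat.succ_eq_add_one]
      ring

lemma fftB_prefix_spec (signal : List Int) :
    fftB_prefix signal = (List.range (signal.length + 1)).map (fun k => (signal.take k).sum) := by
  unfold fftB_prefix
  rw [fftB_prefix_fold]
  rw [List.range_succ_eq_map]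
  simp [List.map_map, Function.comp]

lemma prefix_get (signal : List Int) (k : Int) (h0 : 0 ≤ k) (hn : k ≤ (signal.length : Int)) :
    PySem.List.pyGetD (fftB_prefix signal) k 0 = (signal.take k.toNat).sum := by
  rw [fftB_prefix_spec]
  have : k = ((k.toNat : Nat) : Int) := by omega
  rw [this, PySem.List.pyGetD_natCast]
  rw [List.getD_eq_getElem?_getD]
  have hk : k.toNat < signal.length + 1 := by omega
  simp [hk]
  have hmax : max k 0 = k := by omega
  rw [hmax]

-- the +/- block: A's slice sum equals B's prefix difference
lemma block_eq (signal : List Int) (p rep : Int) (h0 : 0 ≤ p) (hp : p < (signal.length : Int))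
    (hrep : 0 < rep) :
    PySem.List.pyGetD (fftB_prefix signal) (min (p + rep) (signal.length : Int)) 0
      - PySem.List.pyGetD (fftB_prefix signal) p 0
      = (PySem.List.slice signal (some p) (some (p + rep))).sum := by
  obtain ⟨a, rfl⟩ : ∃ a : Nat, p = (a : Int) := ⟨p.toNat, by omega⟩
  obtain ⟨b, hb⟩ : ∃ b : Nat, (a : Int) + rep = (b : Int) := ⟨((a : Int) + rep).toNat, by omega⟩
  have hab : a < b := by omega
  rw [hb, PySem.List.slice_natCast, ← Nat.cast_min,
    prefix_get signal _ (by positivity) (by omega),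
    prefix_get signal _ (by positivity) (by omega)]
  have htoNat : ((min b signal.length : Nat) : Int).toNat = min b signal.length := by omega
  have haNat : ((a : Nat) : Int).toNat = a := by omega
  rw [htoNat, haNat]
  have htrim : signal.take (min b signal.length) = signal.take b := by
    rcases Nat.le_total b signal.length with h | h
    · rw [Nat.min_eq_left h]
    · rw [Nat.min_eq_right h, List.take_of_length_le h, List.take_of_length_le (le_refl _)]
  rw [htrim]
  have htake : signal.take b = signal.take a ++ (signal.drop a).take (b - a) := by
    rw [← List.take_add]
    congr 1
    omega
  rw [htake, List.sum_append]
  ring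

-- core invariant: A's alternating-index loop equals B's signed loop, same fuel, both phases at once
lemma core_loop (signal : List Int) (rep : Int) (hrep : 0 < rep) :
    ∀ (fuel : Nat) (p acc : Int), 0 ≤ p →
      fftA_loop signal rep (4 * rep) fuel acc p p (p + 2 * rep)
        = fftB_loop (fftB_prefix signal) (signal.length : Int) rep fuel acc p 1 ∧
      fftA_loop signal rep (4 * rep) fuel acc p (p + 2 * rep) p
        = fftB_loop (fftB_prefix signal) (signal.length : Int) rep fuel acc p (-1) := by
  intro fuel
  induction fuel with
  | zero => intro p acc _; exact ⟨rfl, rfl⟩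
  | succ fuel ih =>
      intro p acc hp
      have hne : ¬ (p = p + 2 * rep) := by omega
      constructor
      · show fftA_loop _ _ _ (fuel+1) _ _ _ _ = fftB_loop _ _ _ (fuel+1) _ _ _
        simp only [fftA_loop, fftB_loop]
        by_cases h : p < (signal.length : Int)
        · rw [if_pos h, if_pos h, if_pos trivial, block_eq signal p rep hp h hrep, one_mul,
            show p + 4 * rep = (p + 2 * rep) + 2 * rep by ring]
          exact (ih (p + 2 * rep)
            (acc + (PySem.List.slice signal (some p) (some (p + rep))).sum) (by omega)).2
        · rw [if_neg h, if_neg h]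
      · show fftA_loop _ _ _ (fuel+1) _ _ _ _ = fftB_loop _ _ _ (fuel+1) _ _ _
        simp only [fftA_loop, fftB_loop]
        by_cases h : p < (signal.length : Int)
        · rw [if_pos h, if_pos h, if_neg hne, if_pos trivial, block_eq signal p rep hp h hrep,
            neg_one_mul, ← sub_eq_add_neg, neg_neg,
            show p + 4 * rep = (p + 2 * rep) + 2 * rep by ring]
          exact (ih (p + 2 * rep)
            (acc - (PySem.List.slice signal (some p) (some (p + rep))).sum) (by omega)).1
        · rw [if_neg h, if_neg h]

-- ===== VERDICT (by name: the statement is the Claim_ definition above) =====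
theorem fftA_spec : Claim_equal_fftA := by
  intro signal _
  show fftA signal = fftA_alt signal
  unfold fftA fftA_alt
  rw [PySem.List.foldl_append_singleton_eq_map, PySem.List.foldl_append_singleton_eq_map]
  simp only [List.nil_append]
  apply List.map_congr_left
  intro i hi
  have hmem := (PySem.List.mem_pyRange_one).1 hi
  have hi0 : 0 ≤ i := hmem.1
  have h := (core_loop signal (i + 1) (by omega) (signal.length + 1) i 0 hi0).1
  simp only [h]
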